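-- pv_equiv track=rewrite | github.com/xMunji/honsussim25 | csvdatacleaningiter.py | clean_text_field
-- ===== SOURCE A (Python) =====
-- def clean_text_field(text: str) -> str:
--     """
--     Cleans a text field by keeping only basic English letters, numbers,
--     common punctuation, and essential whitespace.
--     Removes other characters and normalizes whitespace.
--     """
--     if not isinstance(text, str):
--         # In case a field is not a string (e.g., already a number type from CSV reader)
--         # though CSV reader usually gives strings.
--         return str(text)
--
--     allowed_chars = []
--     for char_code in [ord(c) for c in text]:
--         # Allow ASCII letters (A-Z, a-z)
--         if (65 <= char_code <= 90) or \
--            (97 <= char_code <= 122):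
--             allowed_chars.append(chr(char_code))
--         # Allow digits (0-9)
--         elif (48 <= char_code <= 57):
--             allowed_chars.append(chr(char_code))
--         # Allow space, newline. Convert tab to space.
--         elif char_code == 32: # space
--             allowed_chars.append(' ')
--         elif char_code == 10: # newline
--             allowed_chars.append('\n')
--         elif char_code == 9:  # tab
--             allowed_chars.append(' ') # Convert tab to space
--         # Allow common punctuation: . , ! ? - + ( ) ; : ' " /
--         elif char_code in [
--             46,  # .
--             44,  # ,
--             33,  # !
--             63,  # ?
--             45,  # -
--             43,  # +
--             40,  # (
--             41,  # )
--             59,  # ;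
--             58,  # :
--             39,  # '
--             34,  # "
--             47,  # /
--         ]:
--             allowed_chars.append(chr(char_code))
--         # Else: character is skipped (e.g., ï, , º, â, •, etc.)
--
--     cleaned_text = "".join(allowed_chars)
--
--     # Normalize whitespace:
--     # 1. Split into lines
--     # 2. For each line, strip leading/trailing whitespace and collapse multiple spaces within the line
--     # 3. Join lines back with newline, filtering out any completely empty lines
--     lines = cleaned_text.split('\n')
--     normalized_lines = []
--     for line in lines:
--         # Remove leading/trailing whitespace from the line and collapse multiple spaces
--         normalized_line = ' '.join(filter(None, line.strip().split(' ')))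
--         normalized_lines.append(normalized_line)
--
--     # Join lines, but filter out any completely empty lines that might result
--     # from original all-whitespace lines or lines that became empty after character stripping.
--     final_text = '\n'.join(filter(None, normalized_lines))
--
--     return final_text
-- ===== SOURCE B (Python) =====
-- _ALLOWED = set("ABCDEFGHIJKLMNOPQRSTUVWXYZabcdefghijklmnopqrstuvwxyz"
--                "0123456789.,!?-+();:'\"/")
--
-- def clean_text_field(text: str) -> str:
--     if not isinstance(text, str):
--         return str(text)
--     lines = []
--     current = []
--     pending_space = False
--     for ch in text:
--         if ch in _ALLOWED:
--             if pending_space and current: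
--                 current.append(' ')
--             current.append(ch)
--             pending_space = False
--         elif ch == ' ' or ch == '\t':
--             pending_space = True
--         elif ch == '\n':
--             if current:
--                 lines.append(''.join(current))
--             current = []
--             pending_space = False
--         # any other character is skipped
--     if current:
--         lines.append(''.join(current))
--     return '\n'.join(lines)
-- ===== Notes on version B (the rewrite author's own statement) =====
-- stated objective: faster
-- what changed: Replaced A's two-phase pipeline (filter into a list, then split/strip/split/filter/join per line) by a single pass over the input maintaining finished lines, the current line and a pending-space flag.
import Mathlib
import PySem

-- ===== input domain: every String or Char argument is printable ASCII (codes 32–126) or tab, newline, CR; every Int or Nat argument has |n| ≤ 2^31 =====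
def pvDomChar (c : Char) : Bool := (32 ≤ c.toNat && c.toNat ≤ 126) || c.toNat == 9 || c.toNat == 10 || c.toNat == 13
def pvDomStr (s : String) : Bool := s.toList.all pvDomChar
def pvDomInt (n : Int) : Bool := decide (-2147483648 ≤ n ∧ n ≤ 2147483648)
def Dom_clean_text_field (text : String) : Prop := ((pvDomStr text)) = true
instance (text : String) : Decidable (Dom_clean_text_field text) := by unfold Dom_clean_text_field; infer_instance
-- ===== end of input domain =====

-- B replaces A's two-phase design (filter pass, then per-line strip/split/join passes)
-- by one single pass keeping finished lines, the current line and a pending-space flag.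

-- ===== PORT A =====
def clean_text_field (text : String) : String :=
  let codes := text.toList.map Char.toNat
  let allowed_chars := codes.foldl (fun acc code =>
    if (65 ≤ code ∧ code ≤ 90) ∨ (97 ≤ code ∧ code ≤ 122) then acc ++ [Char.ofNat code]
    else if 48 ≤ code ∧ code ≤ 57 then acc ++ [Char.ofNat code]
    else if code = 32 then acc ++ [' ']
    else if code = 10 then acc ++ ['\n']
    else if code = 9 then acc ++ [' ']
    else if code ∈ [46, 44, 33, 63, 45, 43, 40, 41, 59, 58, 39, 34, 47] then acc ++ [Char.ofNat code]
    else acc) []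
  let cleaned_text := allowed_chars
  let lines := PySem.Chars.splitOn cleaned_text ['\n']
  let normalized_lines := lines.map (fun line =>
    PySem.Chars.join [' ']
      (List.filter (fun w => w ≠ []) (PySem.Chars.splitOn (PySem.Chars.strip line) [' '])))
  String.ofList (PySem.Chars.join ['\n'] (List.filter (fun l => l ≠ []) normalized_lines))

-- ===== PORT B =====
def pvAllowedB : List Char :=
  "ABCDEFGHIJKLMNOPQRSTUVWXYZabcdefghijklmnopqrstuvwxyz0123456789.,!?-+();:'\"/".toList

def pvStepB (st : List (List Char) × List Char × Bool) (ch : Char) :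
    List (List Char) × List Char × Bool :=
  let (lines, current, pending) := st
  if pvAllowedB.contains ch then
    let current := if pending ∧ current ≠ [] then current ++ [' '] else current
    (lines, current ++ [ch], false)
  else if ch = ' ' ∨ ch = '\t' then (lines, current, true)
  else if ch = '\n' then
    (lines ++ (if current ≠ [] then [current] else []), [], false)
  else (lines, current, pending)

def clean_text_field_alt (text : String) : String :=
  let st := text.toList.foldl pvStepB ([], [], false)
  let lines := st.1 ++ (if st.2.1 ≠ [] then [st.2.1] else [])
  String.ofList (PySem.Chars.join ['\n'] lines)

-- ===== PRECONDITION & SPEC =====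
def Spec_clean_text_field (text : String) (out : String) : Prop := out = clean_text_field_alt text
instance (text : String) (out : String) : Decidable (Spec_clean_text_field text out) := by unfold Spec_clean_text_field; infer_instance

-- ===== CLAIM (what is proved, stated in full; the proofs are below) =====
def Claim_equal_clean_text_field : Prop := ∀ (text : String), Dom_clean_text_field text → Spec_clean_text_field text (clean_text_field text)

-- ===== LEMMAS AND PROOFS =====

-- proof-side helpers: a structural single-char splitter and head/last modifiers
def pvMapHead {α : Type} (f : α → α) : List α → List α
  | [] => []
  | h :: t => f h :: t

def pvMapLast {α : Type} (f : α → α) : List α → List α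
  | [] => []
  | [x] => [f x]
  | x :: y :: t => x :: pvMapLast f (y :: t)

def pvSplit (a : Char) : List Char → List (List Char)
  | [] => [[]]
  | c :: l => if c = a then [] :: pvSplit a l else pvMapHead (fun h => c :: h) (pvSplit a l)

-- per-character value of A's filtering loop
def pvFiltC (c : Char) : List Char :=
  if pvAllowedB.contains c then [c]
  else if c = ' ' ∨ c = '\t' then [' ']
  else if c = '\n' then ['\n']
  else []

-- A's per-line normalization, with splitOn replaced by the structural pvSplit
def pvNormL (l : List Char) : List Char :=
  PySem.Chars.join [' '] (List.filter (fun w => w ≠ []) (pvSplit ' ' (PySem.Chars.strip l)))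

def pvTrail (l : List Char) : Bool := l.getLast? == some ' '

def pvOnlySp (l : List Char) : Prop := ∀ c ∈ l, PySem.Chars.isspace c = (c == ' ')

theorem pvMapHead_mapHead {α : Type} (f g : α → α) (xs : List α) :
    pvMapHead f (pvMapHead g xs) = pvMapHead (fun x => f (g x)) xs := by
  cases xs <;> rfl

theorem pvMapHead_congr {α : Type} (f g : α → α) (xs : List α) (h : ∀ x, f x = g x) :
    pvMapHead f xs = pvMapHead g xs := by
  cases xs <;> simp [pvMapHead, h]

theorem pvMapHead_id {α : Type} (xs : List α) : pvMapHead (fun x => x) xs = xs := by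
  cases xs <;> rfl

theorem pvMapHead_append {α : Type} (f : α → α) (xs ys : List α) (h : xs ≠ []) :
    pvMapHead f (xs ++ ys) = pvMapHead f xs ++ ys := by
  cases xs <;> simp_all [pvMapHead]

theorem pvMapLast_cons {α : Type} (f : α → α) (x : α) (t : List α) (h : t ≠ []) :
    pvMapLast f (x :: t) = x :: pvMapLast f t := by
  cases t <;> simp_all [pvMapLast]

theorem pvMapLast_snoc {α : Type} (f : α → α) (xs : List α) (x : α) :
    pvMapLast f (xs ++ [x]) = xs ++ [f x] := by
  induction xs with
  | nil => rfl
  | cons y ys ih =>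
    rw [List.cons_append, pvMapLast_cons _ _ _ (by simp), ih, List.cons_append]

theorem pvSplit_ne_nil (a : Char) (l : List Char) : pvSplit a l ≠ [] := by
  induction l with
  | nil => simp [pvSplit]
  | cons c l ih =>
    simp only [pvSplit]
    split
    · simp
    · cases h : pvSplit a l with
      | nil => exact absurd h ih
      | cons w t => simp [pvMapHead]

theorem pvSplit_snoc_sep (a : Char) (l : List Char) :
    pvSplit a (l ++ [a]) = pvSplit a l ++ [[]] := by
  induction l with
  | nil => simp [pvSplit]
  | cons c l ih =>
    simp only [List.cons_append, pvSplit, ih]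
    split
    · simp
    · rw [pvMapHead_append _ _ _ (pvSplit_ne_nil a l)]

theorem pvSplit_snoc_ne (a c : Char) (l : List Char) (h : c ≠ a) :
    pvSplit a (l ++ [c]) = pvMapLast (fun w => w ++ [c]) (pvSplit a l) := by
  induction l with
  | nil => simp [pvSplit, h, pvMapHead, pvMapLast]
  | cons d l ih =>
    simp only [List.cons_append, pvSplit, ih]
    split
    · rw [pvMapLast_cons _ _ _ (pvSplit_ne_nil a l)]
    · cases h2 : pvSplit a l with
      | nil => exact absurd h2 (pvSplit_ne_nil a l)
      | cons w t =>
        cases t with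
        | nil => simp [pvMapHead, pvMapLast]
        | cons y t2 => simp [pvMapHead, pvMapLast]

theorem pvSplit_last_ne (a : Char) (l : List Char) (hl : l ≠ [])
    (hlast : l.getLast? ≠ some a) :
    ∃ ps w, pvSplit a l = ps ++ [w] ∧ w ≠ [] := by
  cases l using List.reverseRecOn with
  | nil => exact absurd rfl hl
  | append_singleton l' x =>
    have hx : x ≠ a := by simpa using hlast
    rw [pvSplit_snoc_ne a x l' hx]
    rcases List.eq_nil_or_concat (pvSplit a l') with h | ⟨ps, w0, h⟩
    · exact absurd h (pvSplit_ne_nil a l')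
    · exact ⟨ps, w0 ++ [x], by rw [h, List.concat_eq_append, pvMapLast_snoc], by simp⟩

theorem pvGo_eq (a : Char) : ∀ (fuel : Nat) (l cur : List Char) (acc : List (List Char)),
    l.length < fuel →
    PySem.Chars.splitOn.go [a] fuel l cur acc
      = acc.reverse ++ pvMapHead (fun h => cur.reverse ++ h) (pvSplit a l) := by
  intro fuel
  induction fuel with
  | zero => intro l cur acc h; omega
  | succ fuel ih =>
    intro l cur acc h
    cases l with
    | nil =>
      rw [PySem.Chars.splitOn.go]
      simp [pvSplit, pvMapHead]
      omega
    | cons c rest =>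
      rw [PySem.Chars.splitOn.go]
      simp only [List.isPrefixOf, List.isPrefixOf_nil_left, Bool.and_true, List.length_cons] at *
      by_cases hca : c = a
      · subst hca
        simp only [beq_self_eq_true, if_pos, List.length_nil, List.length_cons,
          List.drop_succ_cons, List.drop_zero, List.length_singleton]
        rw [ih rest [] (cur.reverse :: acc) (by omega)]
        simp only [pvSplit, if_pos rfl, pvMapHead, List.reverse_cons, List.append_assoc,
          List.nil_append, List.append_nil, List.reverse_nil, List.singleton_append,
          List.cons_append]
        cases hsp : pvSplit c rest <;> simp [pvMapHead]
      · have : (a == c) = false := beq_eq_false_iff_ne.mpr (Ne.symm hca)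
        simp only [this, Bool.false_eq_true, if_neg, reduceCtorEq, not_false_eq_true]
        rw [ih rest (c :: cur) acc (by omega)]
        cases hsp : pvSplit a rest with
        | nil => exact absurd hsp (pvSplit_ne_nil a rest)
        | cons w t => simp [pvSplit, hca, hsp, pvMapHead]

theorem pvSplitOn_eq (a : Char) (l : List Char) :
    PySem.Chars.splitOn l [a] = pvSplit a l := by
  have := pvGo_eq a (l.length + 1) l [] [] (by omega)
  simpa [PySem.Chars.splitOn, pvMapHead_id] using this

theorem pvJoin_snoc (s w : List Char) (ws : List (List Char)) :
    PySem.Chars.join s (ws ++ [w]) = if ws = [] then w else PySem.Chars.join s ws ++ s ++ w := by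
  induction ws with
  | nil => simp [PySem.Chars.join_singleton]
  | cons x ws ih =>
    cases ws with
    | nil => simp [PySem.Chars.join_cons_cons, PySem.Chars.join_singleton]
    | cons y t =>
      simp only [List.cons_append, PySem.Chars.join_cons_cons] at *
      rw [ih]
      simp [List.append_assoc]

theorem pvJoin_ne_nil (s : List Char) (ws : List (List Char)) (hws : ws ≠ [])
    (h : ∀ w ∈ ws, w ≠ []) : PySem.Chars.join s ws ≠ [] := by
  cases ws with
  | nil => simp at hws
  | cons w t =>
    cases t with
    | nil => simpa [PySem.Chars.join_singleton] using h w (by simp)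
    | cons y t2 =>
      rw [PySem.Chars.join_cons_cons]
      have := h w (by simp)
      simp_all
theorem pvIsspaceSpace : PySem.Chars.isspace ' ' = true := by decide

theorem pvStrip_snoc_space (l : List Char) :
    PySem.Chars.strip (l ++ [' ']) = PySem.Chars.strip l := by
  simp only [PySem.Chars.strip, PySem.Chars.lstrip, PySem.Chars.rstrip]
  rw [List.dropWhile_append]
  split
  · next h =>
    simp only [List.isEmpty_iff] at h
    simp [h, List.dropWhile, pvIsspaceSpace]
  · simp [List.reverse_append, List.dropWhile_cons, pvIsspaceSpace]

theorem pvStrip_snoc_nonspace (l : List Char) (c : Char)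
    (hc : PySem.Chars.isspace c = false) :
    PySem.Chars.strip (l ++ [c]) = PySem.Chars.lstrip l ++ [c] := by
  simp only [PySem.Chars.strip, PySem.Chars.lstrip, PySem.Chars.rstrip]
  rw [List.dropWhile_append]
  split
  · next h =>
    simp only [List.isEmpty_iff] at h
    simp [h, List.dropWhile, hc]
  · simp [List.reverse_append, hc]

theorem pvOnlySp_nil : pvOnlySp [] := by
  intro c hc; simp at hc

theorem pvOnlySp_snoc (l : List Char) (c : Char) (h : pvOnlySp l)
    (hc : PySem.Chars.isspace c = (c == ' ')) : pvOnlySp (l ++ [c]) := by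
  intro d hd
  rcases List.mem_append.mp hd with hd | hd
  · exact h d hd
  · simp at hd; subst hd; exact hc

theorem pvOnlySp_lstrip (l : List Char) (h : pvOnlySp l) :
    pvOnlySp (PySem.Chars.lstrip l) := by
  intro d hd
  simp only [PySem.Chars.lstrip] at hd
  exact h d ((List.dropWhile_sublist _).subset hd)

theorem pvRstrip_decomp (m : List Char) (h : pvOnlySp m) :
    ∃ k, m = PySem.Chars.rstrip m ++ List.replicate k ' ' := by
  have hsplit : List.takeWhile PySem.Chars.isspace m.reverse
      ++ List.dropWhile PySem.Chars.isspace m.reverse = m.reverse :=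
    List.takeWhile_append_dropWhile
  refine ⟨(List.takeWhile PySem.Chars.isspace m.reverse).length, ?_⟩
  have hrep : (List.takeWhile PySem.Chars.isspace m.reverse).reverse
      = List.replicate (List.takeWhile PySem.Chars.isspace m.reverse).length ' ' := by
    have hmem : ∀ b ∈ (List.takeWhile PySem.Chars.isspace m.reverse).reverse, b = ' ' := by
      intro b hb
      rw [List.mem_reverse] at hb
      have hsp := List.mem_takeWhile_imp hb
      have hbm : b ∈ m := by
        rw [← List.mem_reverse]
        exact (List.takeWhile_sublist _).subset hb
      have := h b hbm
      rw [hsp] at this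
      exact eq_of_beq this.symm
    have := List.eq_replicate_of_mem hmem
    simpa using this
  calc m = m.reverse.reverse := by simp
    _ = (List.dropWhile PySem.Chars.isspace m.reverse).reverse
        ++ (List.takeWhile PySem.Chars.isspace m.reverse).reverse := by
          rw [← List.reverse_append, hsplit]
    _ = PySem.Chars.rstrip m ++ List.replicate _ ' ' := by
          rw [hrep]; rfl

theorem pvRstrip_getLast (m : List Char) (c : Char)
    (h : (PySem.Chars.rstrip m).getLast? = some c) : PySem.Chars.isspace c = false := by
  simp only [PySem.Chars.rstrip, List.getLast?_reverse] at h
  have := List.head?_dropWhile_not PySem.Chars.isspace m.reverse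
  rw [h] at this
  simpa using this

theorem pvSplit_append_rep (r : List Char) (k : Nat) :
    pvSplit ' ' (r ++ List.replicate k ' ') = pvSplit ' ' r ++ List.replicate k [] := by
  induction k with
  | zero => simp
  | succ k ih =>
    rw [List.replicate_succ' (n := k), ← List.append_assoc, pvSplit_snoc_sep, ih,
      List.replicate_succ' (n := k), List.append_assoc]

theorem pvNormL_nil : pvNormL [] = [] := by decide

theorem pvTrail_nil : pvTrail [] = false := by decide

theorem pvTrail_snoc (l : List Char) (c : Char) : pvTrail (l ++ [c]) = (c == ' ') := by
  simp [pvTrail, List.getLast?_append]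

theorem pvNormL_snoc_space (l : List Char) : pvNormL (l ++ [' ']) = pvNormL l := by
  simp only [pvNormL, pvStrip_snoc_space]

theorem pvGetLast_lstrip (l : List Char) (h : PySem.Chars.lstrip l ≠ []) :
    l.getLast? = (PySem.Chars.lstrip l).getLast? := by
  conv_lhs => rw [show l = List.takeWhile PySem.Chars.isspace l ++ PySem.Chars.lstrip l from
    (List.takeWhile_append_dropWhile).symm]
  rw [List.getLast?_append]
  cases hg : (PySem.Chars.lstrip l).getLast? with
  | none => exact absurd (List.getLast?_eq_none_iff.mp hg) h
  | some d => rfl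

theorem pvNormL_snoc (l : List Char) (c : Char) (hsp : pvOnlySp l)
    (hc : PySem.Chars.isspace c = false) :
    pvNormL (l ++ [c])
      = (if pvTrail l = true ∧ pvNormL l ≠ [] then pvNormL l ++ [' '] else pvNormL l) ++ [c] := by
  have hc' : c ≠ ' ' := by
    intro h; rw [h, pvIsspaceSpace] at hc; exact absurd hc (by simp)
  have hLHS : pvNormL (l ++ [c])
      = PySem.Chars.join [' ']
          (List.filter (fun w => w ≠ []) (pvSplit ' ' (PySem.Chars.lstrip l ++ [c]))) := by
    simp only [pvNormL, pvStrip_snoc_nonspace l c hc]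
  obtain ⟨k, hdec⟩ := pvRstrip_decomp (PySem.Chars.lstrip l) (pvOnlySp_lstrip l hsp)
  have hNl : pvNormL l
      = PySem.Chars.join [' ']
          (List.filter (fun w => w ≠ []) (pvSplit ' ' (PySem.Chars.rstrip (PySem.Chars.lstrip l)))) := by
    simp only [pvNormL, PySem.Chars.strip]
  by_cases hm0 : PySem.Chars.lstrip l = []
  · have hr0 : PySem.Chars.rstrip (PySem.Chars.lstrip l) = [] := by
      rw [hm0]; rfl
    rw [hLHS, hm0, hNl, hr0]
    simp [pvSplit, pvMapHead, hc', PySem.Chars.join_singleton, PySem.Chars.join_nil]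
  · cases k with
    | zero =>
      simp only [List.replicate_zero, List.append_nil] at hdec
      obtain ⟨d, hd⟩ := List.getLast?_isSome.mpr hm0 |> Option.isSome_iff_exists.mp
      have hdns : PySem.Chars.isspace d = false := by
        apply pvRstrip_getLast (PySem.Chars.lstrip l)
        rw [← hdec, hd]
      have hd' : (d == ' ') = false := by
        refine beq_eq_false_iff_ne.mpr ?_
        intro h; rw [h, pvIsspaceSpace] at hdns; exact absurd hdns (by simp)
      have htr : pvTrail l = false := by
        rw [pvTrail, pvGetLast_lstrip l hm0, hd]
        simpa using hd'
      obtain ⟨ps, w, hps, hw⟩ := pvSplit_last_ne ' ' (PySem.Chars.lstrip l) hm0 (by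
        rw [hd]; intro hcon; simp at hcon; subst hcon; simp at hd')
      rw [hLHS, pvSplit_snoc_ne _ _ _ hc', hps, pvMapLast_snoc, hNl, ← hdec, hps, htr]
      simp only [Bool.false_eq_true, false_and, if_neg, not_false_eq_true]
      have hfc : List.filter (fun w => decide (w ≠ [])) [w ++ [c]] = [w ++ [c]] := by simp
      have hfw : List.filter (fun w => decide (w ≠ [])) [w] = [w] := by simpa using hw
      rw [List.filter_append, List.filter_append, hfc, hfw, pvJoin_snoc, pvJoin_snoc]
      split
      · simp
      · simp [List.append_assoc]
    | succ k' =>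
      have htr : pvTrail l = true := by
        rw [pvTrail, pvGetLast_lstrip l (by rw [hdec]; simp), hdec,
          List.replicate_succ' (n := k'), ← List.append_assoc]
        simp [List.getLast?_append]
      rw [hLHS, hdec, pvSplit_snoc_ne _ _ _ hc', pvSplit_append_rep,
        List.replicate_succ' (n := k'), ← List.append_assoc, pvMapLast_snoc]
      simp only [List.nil_append]
      have hf1 : List.filter (fun w => decide (w ≠ [])) [[c]] = [[c]] := by simp
      have hf2 : List.filter (fun w => decide (w ≠ [])) (List.replicate k' ([] : List Char)) = [] := by
        simp
      rw [List.filter_append, hf1, List.filter_append, hf2, List.append_nil, pvJoin_snoc, hNl, htr]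
      by_cases hFr : List.filter (fun w => decide (w ≠ []))
          (pvSplit ' ' (PySem.Chars.rstrip (PySem.Chars.lstrip l))) = []
      · rw [if_pos hFr, hFr]
        simp
      · rw [if_neg hFr]
        have hne : PySem.Chars.join [' '] (List.filter (fun w => decide (w ≠ []))
            (pvSplit ' ' (PySem.Chars.rstrip (PySem.Chars.lstrip l)))) ≠ [] := by
          apply pvJoin_ne_nil _ _ hFr
          intro x hx
          simpa using (List.mem_filter.mp hx).2
        rw [if_pos ⟨rfl, hne⟩]
theorem pvCharLt (c : Char) (h : pvDomChar c = true) : c.toNat < 127 := by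
  simp [pvDomChar] at h; omega

set_option maxRecDepth 8192 in
theorem pvKeepFacts : ∀ n : Nat, n < 127 → pvAllowedB.contains (Char.ofNat n) = true →
    PySem.Chars.isspace (Char.ofNat n) = false ∧ (Char.ofNat n == ' ') = false ∧
      Char.ofNat n ≠ '\n' ∧ Char.ofNat n ≠ ' ' ∧ Char.ofNat n ≠ '\t' := by
  decide

theorem pvMain : ∀ (cs : List Char), (∀ c ∈ cs, pvDomChar c = true) →
    ∀ (ls : List (List Char)) (seg : List Char), pvOnlySp seg →
    (cs.foldl pvStepB (ls, pvNormL seg, pvTrail seg)).1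
      ++ (if (cs.foldl pvStepB (ls, pvNormL seg, pvTrail seg)).2.1 ≠ []
          then [(cs.foldl pvStepB (ls, pvNormL seg, pvTrail seg)).2.1] else [])
    = ls ++ List.filter (fun w => w ≠ [])
        (List.map pvNormL (pvMapHead (fun h => seg ++ h) (pvSplit '\n' (cs.flatMap pvFiltC)))) := by
  intro cs
  induction cs with
  | nil =>
    intro _ ls seg _
    simp only [List.foldl_nil, List.flatMap_nil, pvSplit, pvMapHead, List.append_nil,
      List.map_cons, List.map_nil, List.filter_cons, List.filter_nil]
    split
    · next h => simp [h]
    · next h => simp at h; simp [h]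
  | cons c cs ih =>
    intro hdom ls seg hsp
    have hc := hdom c (by simp)
    have hcs : ∀ x ∈ cs, pvDomChar x = true := fun x hx => hdom x (by simp [hx])
    have hlt := pvCharLt c hc
    rw [List.foldl_cons]
    by_cases hk : pvAllowedB.contains c = true
    · obtain ⟨hiss, hbeq, hnl, hspc, htab⟩ := by
        have := pvKeepFacts c.toNat hlt (by rw [Char.ofNat_toNat]; exact hk)
        rwa [Char.ofNat_toNat] at this
      have hstep : pvStepB (ls, pvNormL seg, pvTrail seg) c
          = (ls, pvNormL (seg ++ [c]), pvTrail (seg ++ [c])) := by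
        simp only [pvStepB, hk, if_pos]
        rw [pvNormL_snoc seg c hsp hiss, pvTrail_snoc]
        simp [hbeq]
      rw [hstep, ih hcs ls (seg ++ [c]) (pvOnlySp_snoc seg c hsp (by rw [hiss, hbeq]))]
      have hflt : pvFiltC c = [c] := by unfold pvFiltC; rw [if_pos hk]
      rw [List.flatMap_cons, hflt]
      simp only [List.singleton_append, pvSplit, if_neg hnl, pvMapHead_mapHead]
      rw [pvMapHead_congr (fun x => seg ++ (c :: x)) (fun x => (seg ++ [c]) ++ x) _ (by
        intro x; simp)]
    · by_cases hs : c = ' ' ∨ c = '\t'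
      · have hstep : pvStepB (ls, pvNormL seg, pvTrail seg) c
            = (ls, pvNormL (seg ++ [' ']), pvTrail (seg ++ [' '])) := by
          simp only [pvStepB, hk, Bool.false_eq_true, if_neg, not_false_eq_true, if_pos hs]
          rw [pvNormL_snoc_space, pvTrail_snoc]
          simp
        rw [hstep, ih hcs ls (seg ++ [' ']) (pvOnlySp_snoc seg ' ' hsp (by decide))]
        have hflt : pvFiltC c = [' '] := by unfold pvFiltC; rw [if_neg hk, if_pos hs]
        rw [List.flatMap_cons, hflt]
        have hns : (' ' : Char) ≠ '\n' := by decide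
        simp only [List.singleton_append, pvSplit, if_neg hns, pvMapHead_mapHead]
        rw [pvMapHead_congr (fun x => seg ++ (' ' :: x)) (fun x => (seg ++ [' ']) ++ x) _ (by
          intro x; simp)]
      · by_cases hn : c = '\n'
        · subst hn
          have hstep : pvStepB (ls, pvNormL seg, pvTrail seg) '\n'
              = (ls ++ (if pvNormL seg ≠ [] then [pvNormL seg] else []),
                 pvNormL [], pvTrail []) := by
            simp only [pvStepB, hk, Bool.false_eq_true, if_neg, not_false_eq_true, if_neg hs]
            simp [pvNormL_nil, pvTrail_nil]
          rw [hstep, ih hcs _ [] pvOnlySp_nil]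
          have hflt : pvFiltC '\n' = ['\n'] := by
            unfold pvFiltC; rw [if_neg hk, if_neg hs, if_pos rfl]
          rw [List.flatMap_cons, hflt, List.singleton_append]
          rw [pvMapHead_congr (fun h => [] ++ h) (fun h => h) _ (by intro x; simp),
            pvMapHead_id]
          rw [show pvSplit '\n' ('\n' :: List.flatMap pvFiltC cs)
              = [] :: pvSplit '\n' (List.flatMap pvFiltC cs) from by simp [pvSplit]]
          rw [show pvMapHead (fun h => seg ++ h)
                ([] :: pvSplit '\n' (List.flatMap pvFiltC cs))
              = (seg ++ []) :: pvSplit '\n' (List.flatMap pvFiltC cs) from rfl]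
          simp only [List.append_nil, List.map_cons, List.filter_cons]
          split
          · next h => simp [h, List.append_assoc]
          · next h => simp at h; simp [h, List.append_assoc]
        · have hstep : pvStepB (ls, pvNormL seg, pvTrail seg) c
              = (ls, pvNormL seg, pvTrail seg) := by
            simp only [pvStepB, hk, Bool.false_eq_true, if_neg, not_false_eq_true, if_neg hs,
              if_neg hn]
          rw [hstep, ih hcs ls seg hsp]
          have hflt : pvFiltC c = [] := by unfold pvFiltC; rw [if_neg hk, if_neg hs, if_neg hn]
          rw [List.flatMap_cons, hflt, List.nil_append]
set_option maxRecDepth 8192 in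
theorem pvAstep_char : ∀ n : Nat, n < 127 →
    (if (65 ≤ n ∧ n ≤ 90) ∨ (97 ≤ n ∧ n ≤ 122) then ([] : List Char) ++ [Char.ofNat n]
     else if 48 ≤ n ∧ n ≤ 57 then [] ++ [Char.ofNat n]
     else if n = 32 then [] ++ [' ']
     else if n = 10 then [] ++ ['\n']
     else if n = 9 then [] ++ [' ']
     else if n ∈ [46, 44, 33, 63, 45, 43, 40, 41, 59, 58, 39, 34, 47] then [] ++ [Char.ofNat n]
     else []) = pvFiltC (Char.ofNat n) := by
  decide

theorem pvAstep_acc (acc : List Char) (n : Nat) :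
    (if (65 ≤ n ∧ n ≤ 90) ∨ (97 ≤ n ∧ n ≤ 122) then acc ++ [Char.ofNat n]
     else if 48 ≤ n ∧ n ≤ 57 then acc ++ [Char.ofNat n]
     else if n = 32 then acc ++ [' ']
     else if n = 10 then acc ++ ['\n']
     else if n = 9 then acc ++ [' ']
     else if n ∈ [46, 44, 33, 63, 45, 43, 40, 41, 59, 58, 39, 34, 47] then acc ++ [Char.ofNat n]
     else acc)
    = acc ++
      (if (65 ≤ n ∧ n ≤ 90) ∨ (97 ≤ n ∧ n ≤ 122) then ([] : List Char) ++ [Char.ofNat n]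
       else if 48 ≤ n ∧ n ≤ 57 then [] ++ [Char.ofNat n]
       else if n = 32 then [] ++ [' ']
       else if n = 10 then [] ++ ['\n']
       else if n = 9 then [] ++ [' ']
       else if n ∈ [46, 44, 33, 63, 45, 43, 40, 41, 59, 58, 39, 34, 47] then [] ++ [Char.ofNat n]
       else []) := by
  split_ifs <;> simp

theorem pvFoldA : ∀ (cs : List Char), (∀ c ∈ cs, pvDomChar c = true) → ∀ (acc : List Char),
    List.foldl (fun acc code =>
      if (65 ≤ code ∧ code ≤ 90) ∨ (97 ≤ code ∧ code ≤ 122) then acc ++ [Char.ofNat code]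
      else if 48 ≤ code ∧ code ≤ 57 then acc ++ [Char.ofNat code]
      else if code = 32 then acc ++ [' ']
      else if code = 10 then acc ++ ['\n']
      else if code = 9 then acc ++ [' ']
      else if code ∈ [46, 44, 33, 63, 45, 43, 40, 41, 59, 58, 39, 34, 47] then acc ++ [Char.ofNat code]
      else acc) acc (cs.map Char.toNat)
    = acc ++ cs.flatMap pvFiltC := by
  intro cs
  induction cs with
  | nil => intro _ acc; simp
  | cons c cs ih =>
    intro hdom acc
    have hc := pvCharLt c (hdom c (by simp))
    rw [List.map_cons, List.foldl_cons, pvAstep_acc, pvAstep_char c.toNat hc,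
      Char.ofNat_toNat, ih (fun x hx => hdom x (by simp [hx])), List.flatMap_cons,
      List.append_assoc]

theorem pvMapFn_eq : (fun line => PySem.Chars.join [' ']
      (List.filter (fun w => w ≠ []) (PySem.Chars.splitOn (PySem.Chars.strip line) [' '])))
    = pvNormL := by
  funext line
  rw [pvSplitOn_eq]
  rfl

-- ===== VERDICT (by name: the statement is the Claim_ definition above) =====
theorem clean_text_field_spec : Claim_equal_clean_text_field := by
  unfold Claim_equal_clean_text_field
  intro text hdom
  unfold Spec_clean_text_field
  have hd : ∀ c ∈ text.toList, pvDomChar c = true := by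
    simpa [Dom_clean_text_field, pvDomStr, List.all_eq_true] using hdom
  show clean_text_field text = clean_text_field_alt text
  unfold clean_text_field clean_text_field_alt
  simp only []
  rw [pvFoldA text.toList hd [], List.nil_append, pvSplitOn_eq, pvMapFn_eq]
  have h0 := pvMain text.toList hd [] [] pvOnlySp_nil
  rw [pvMapHead_congr (fun h => [] ++ h) (fun h => h) _ (by intro x; simp),
    pvMapHead_id] at h0
  rw [pvNormL_nil, pvTrail_nil, List.nil_append] at h0
  rw [h0]
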